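-- pv_equiv track=rewrite | github.com/chungwwei/CF_div3 | contest_787_div3/make_it_increasing.py | solve
-- ===== SOURCE A (Python) =====
-- def solve(A, n):
-- 	res = 0
-- 	for i in range(n - 2, -1 , -1):
-- 		while A[i] >= A[i + 1] and A[i] > 0:
-- 			A[i] //= 2
-- 			res += 1
--
-- 		if A[i] == A[i + 1]:
-- 			return -1
--
-- 	return res
-- ===== SOURCE B (Python) =====
-- def _shift_count(v, w):
--     # number of halvings applied to v (v >= w, v > 0): smallest k with
--     # (v >> k) < w when w > 0; otherwise v.bit_length() (halve down to 0).
--     if w > 0: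
--         k = v.bit_length() - w.bit_length()
--         if (v >> k) >= w:
--             k += 1
--         return k
--     return v.bit_length()
--
--
-- def solve(A, n):
--     res = 0
--     for i in range(n - 2, -1, -1):
--         v, w = A[i], A[i + 1]
--         if v >= w and v > 0:
--             k = _shift_count(v, w)
--             v >>= k
--             A[i] = v
--             res += k
--         if v == w:
--             return -1
--     return res
-- ===== Notes on version B (the rewrite author's own statement) =====
-- stated objective: alternative
-- what changed: The inner while-loop that repeatedly halves A[i] is replaced by a closed-form shift count computed from bit lengths (k = bit_length difference, +1 if needed; bit_length(A[i]) when the successor is <= 0), applied with a single shift.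
import Mathlib
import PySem

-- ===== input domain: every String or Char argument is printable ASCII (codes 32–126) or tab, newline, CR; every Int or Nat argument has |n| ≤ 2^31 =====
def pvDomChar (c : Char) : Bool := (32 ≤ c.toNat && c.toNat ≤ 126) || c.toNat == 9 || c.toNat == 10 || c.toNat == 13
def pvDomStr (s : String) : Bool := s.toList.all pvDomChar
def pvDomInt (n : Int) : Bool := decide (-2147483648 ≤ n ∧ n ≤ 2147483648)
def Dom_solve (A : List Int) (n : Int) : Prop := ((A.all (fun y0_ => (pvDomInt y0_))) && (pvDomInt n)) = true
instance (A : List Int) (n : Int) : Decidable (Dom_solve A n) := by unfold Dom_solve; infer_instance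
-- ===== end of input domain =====

-- B replaces A's inner halving `while` by a closed-form shift count obtained from bit lengths
-- (objective: alternative/constant-factor).  A mutates its argument list in place; the theorems
-- here are about the RETURN value only (B performs the same final mutation in Python).

-- ===== PORT A =====
-- the inner `while A[i] >= A[i+1] and A[i] > 0: A[i] //= 2; res += 1`,
-- carried out on the current value v = A[i]; returns (final value of A[i], halvings done)
def halveLoop (v w : Int) : Int × Int :=
  if w ≤ v ∧ 0 < v then
    ((halveLoop (PySem.Int.floordiv v 2) w).1, (halveLoop (PySem.Int.floordiv v 2) w).2 + 1)
  else (v, 0)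
termination_by v.toNat
decreasing_by
  rcases Classical.em (w ≤ v ∧ 0 < v) with h | h
  · rw [PySem.Int.floordiv_eq_ediv_of_pos (by omega)]; omega
  · exact absurd ‹_› h

-- the `for i in range(n-2, -1, -1)` loop of A; i is the current index, res the accumulator;
-- pyGet? = Python indexing (none = IndexError, excluded by Pre_solve; fallback value 0 unreachable there)
def loopA : Nat → List Int → Int → Int
  | 0, A, res =>
    match PySem.List.pyGet? A 0, PySem.List.pyGet? A 1 with
    | some ai, some ai1 =>
      if (halveLoop ai ai1).1 = ai1 then -1 else res + (halveLoop ai ai1).2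
    | _, _ => 0
  | j+1, A, res =>
    match PySem.List.pyGet? A ((j : Int)+1), PySem.List.pyGet? A ((j : Int)+2) with
    | some ai, some ai1 =>
      if (halveLoop ai ai1).1 = ai1 then -1
      else loopA j (A.set (j+1) (halveLoop ai ai1).1) (res + (halveLoop ai ai1).2)
    | _, _ => 0

def solve (A : List Int) (n : Int) : Int :=
  if 2 ≤ n then loopA (n - 2).toNat A 0 else 0

-- ===== PORT B =====
-- Source B's _shift_count: closed-form number of halvings via bit lengths
-- (v.bit_length() = PySem.Int.bitLength v; Python `v >> k` = Lean `v >>> k.toNat`, exact for the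
-- nonnegative shift amounts that occur here)
def shiftCount (v w : Int) : Int :=
  if 0 < w then
    if w ≤ v >>> ((PySem.Int.bitLength v : Int) - (PySem.Int.bitLength w : Int)).toNat
    then ((PySem.Int.bitLength v : Int) - (PySem.Int.bitLength w : Int)) + 1
    else (PySem.Int.bitLength v : Int) - (PySem.Int.bitLength w : Int)
  else (PySem.Int.bitLength v : Int)

-- Source B's for-loop: one shift per index instead of a while-loop
def loopB : Nat → List Int → Int → Int
  | 0, A, res =>
    match PySem.List.pyGet? A 0, PySem.List.pyGet? A 1 with
    | some v, some w =>
      if w ≤ v ∧ 0 < v then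
        if v >>> (shiftCount v w).toNat = w then -1 else res + shiftCount v w
      else if v = w then -1 else res
    | _, _ => 0
  | j+1, A, res =>
    match PySem.List.pyGet? A ((j : Int)+1), PySem.List.pyGet? A ((j : Int)+2) with
    | some v, some w =>
      if w ≤ v ∧ 0 < v then
        if v >>> (shiftCount v w).toNat = w then -1
        else loopB j (A.set (j+1) (v >>> (shiftCount v w).toNat)) (res + shiftCount v w)
      else if v = w then -1 else loopB j A res
    | _, _ => 0

def solve_alt (A : List Int) (n : Int) : Int :=
  if 2 ≤ n then loopB (n - 2).toNat A 0 else 0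

-- ===== PRECONDITION & SPEC =====
-- Pre_ excludes exactly the inputs where A raises IndexError: 2 ≤ n requires indices 0..n-1 to exist.
def Pre_solve (A : List Int) (n : Int) : Prop := n ≤ 1 ∨ n ≤ (A.length : Int)
instance (A : List Int) (n : Int) : Decidable (Pre_solve A n) := by unfold Pre_solve; infer_instance
def pvWitness_solve : List Int × Int := ([3, 1, 2], 3)

def Spec_solve (A : List Int) (n : Int) (out : Int) : Prop := out = solve_alt A n
instance (A : List Int) (n : Int) (out : Int) : Decidable (Spec_solve A n out) := by unfold Spec_solve; infer_instance

-- ===== CLAIM (what is proved, stated in full; the proofs are below) =====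
def Claim_equal_solve : Prop := ∀ (A : List Int) (n : Int), Dom_solve A n → Pre_solve A n → Spec_solve A n (solve A n)

-- ===== LEMMAS AND PROOFS =====

theorem shr_zero (v : Int) : v >>> (0 : Nat) = v := by simp

theorem shr_succ (v : Int) (k : Nat) : v >>> (k+1) = (v/2) >>> k := by
  rw [Int.shiftRight_eq_div_pow, Int.shiftRight_eq_div_pow]
  push_cast
  rw [pow_succ, mul_comm, ← Int.ediv_ediv_of_nonneg (by norm_num)]

-- bit-length bounds, specialised to positive v
theorem bl_lower (v : Int) (hv : 0 < v) : (2 : Int) ^ (PySem.Int.bitLength v - 1) ≤ v := by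
  have h := PySem.Int.two_pow_bitLength_le v (by omega)
  have : (v.natAbs : Int) = v := Int.natAbs_of_nonneg (by omega)
  calc (2:Int) ^ (PySem.Int.bitLength v - 1) = ((2 ^ (PySem.Int.bitLength v - 1) : Nat) : Int) := by push_cast; ring
  _ ≤ (v.natAbs : Int) := by exact_mod_cast h
  _ = v := this

theorem bl_upper (v : Int) (hv : 0 ≤ v) : v < (2 : Int) ^ PySem.Int.bitLength v := by
  have h := PySem.Int.lt_two_pow_bitLength v
  have : (v.natAbs : Int) = v := Int.natAbs_of_nonneg hv
  calc v = (v.natAbs : Int) := this.symm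
  _ < ((2 ^ PySem.Int.bitLength v : Nat) : Int) := by exact_mod_cast h
  _ = (2:Int) ^ PySem.Int.bitLength v := by push_cast; ring

-- bit length is monotone on positives
theorem bl_mono (v w : Int) (hw : 0 < w) (hvw : w ≤ v) :
    PySem.Int.bitLength w ≤ PySem.Int.bitLength v := by
  by_contra h
  push_neg at h
  have h1 : v < (2:Int) ^ PySem.Int.bitLength v := bl_upper v (by omega)
  have h2 : (2:Int) ^ (PySem.Int.bitLength w - 1) ≤ w := bl_lower w hw
  have h3 : PySem.Int.bitLength v ≤ PySem.Int.bitLength w - 1 := by omega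
  have h4 : (2:Int) ^ PySem.Int.bitLength v ≤ (2:Int) ^ (PySem.Int.bitLength w - 1) :=
    pow_le_pow_right₀ (by norm_num) h3
  omega

-- from an upper power bound back to a bit-length bound
theorem bl_le_of_lt_pow (v : Int) (m : Nat) (hv : 0 < v) (h : v < (2:Int) ^ m) :
    PySem.Int.bitLength v ≤ m := by
  by_contra hc
  push_neg at hc
  have h2 : (2:Int) ^ (PySem.Int.bitLength v - 1) ≤ v := bl_lower v hv
  have h3 : (2:Int) ^ m ≤ (2:Int) ^ (PySem.Int.bitLength v - 1) :=
    pow_le_pow_right₀ (by norm_num) (by omega)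
  omega

theorem bl_half (v : Int) (hv : 0 < v) :
    PySem.Int.bitLength v = PySem.Int.bitLength (v / 2) + 1 := by
  have := PySem.Int.bitLength_of_pos hv
  rwa [PySem.Int.floordiv_eq_ediv_of_pos (by norm_num)] at this

theorem sc_nonneg (v w : Int) (hv : 0 < v) (hw : w ≤ v) : 0 ≤ shiftCount v w := by
  unfold shiftCount
  split
  · have hd : PySem.Int.bitLength w ≤ PySem.Int.bitLength v := bl_mono v w (by omega) hw
    split <;> omega
  · positivity

-- the recurrence satisfied by the closed-form count
theorem sc_rec (v w : Int) (hv : 0 < v) (hw : w ≤ v) :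
    shiftCount v w = (if w ≤ v / 2 ∧ 0 < v / 2 then shiftCount (v / 2) w else 0) + 1 := by
  by_cases hw0 : 0 < w
  · by_cases h2 : w ≤ v / 2 ∧ 0 < v / 2
    · -- one more halving than v/2 needs
      have hbl : PySem.Int.bitLength v = PySem.Int.bitLength (v / 2) + 1 := bl_half v hv
      have hd2 : PySem.Int.bitLength w ≤ PySem.Int.bitLength (v / 2) := bl_mono _ _ hw0 h2.1
      have hsh : v >>> ((PySem.Int.bitLength v : Int) - PySem.Int.bitLength w).toNat
          = (v / 2) >>> ((PySem.Int.bitLength (v / 2) : Int) - PySem.Int.bitLength w).toNat := by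
        have ht : ((PySem.Int.bitLength v : Int) - PySem.Int.bitLength w).toNat
            = ((PySem.Int.bitLength (v / 2) : Int) - PySem.Int.bitLength w).toNat + 1 := by omega
        rw [ht, shr_succ]
      simp only [shiftCount, if_pos hw0, if_pos h2, hsh]
      split <;> omega
    · -- exactly one halving left
      have hone : shiftCount v w = 1 := by
        by_cases hv2 : 0 < v / 2
        · -- v/2 < w ≤ v : bit lengths differ by at most one
          have hlt : v / 2 < w := by
            rcases Classical.em (w ≤ v / 2) with h | h
            · exact absurd ⟨h, hv2⟩ h2
            · omega
          have hdge : PySem.Int.bitLength w ≤ PySem.Int.bitLength v := bl_mono v w hw0 hw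
          have hup : v < (2:Int) ^ (PySem.Int.bitLength w + 1) := by
            have h1 : w < (2:Int) ^ PySem.Int.bitLength w := bl_upper w (by omega)
            have h2' : (2:Int) ^ (PySem.Int.bitLength w + 1) = 2 * (2:Int) ^ PySem.Int.bitLength w := by
              rw [pow_succ]; ring
            omega
          have hdle : PySem.Int.bitLength v ≤ PySem.Int.bitLength w + 1 :=
            bl_le_of_lt_pow v _ hv hup
          unfold shiftCount
          rw [if_pos hw0]
          rcases Nat.eq_or_lt_of_le hdle with hcase | hcase
          · -- d = 1 : v >>> 1 = v/2 < w, count is d = 1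
            have hd1 : ((PySem.Int.bitLength v : Int) - PySem.Int.bitLength w).toNat = 1 := by omega
            rw [hd1, shr_succ, shr_zero]
            rw [if_neg (by omega)]
            omega
          · -- d = 0 : v >>> 0 = v ≥ w, count is d + 1 = 1
            have hd0 : ((PySem.Int.bitLength v : Int) - PySem.Int.bitLength w).toNat = 0 := by omega
            rw [hd0, shr_zero, if_pos hw]
            omega
        · -- v = 1, hence w = 1
          have hv1 : v = 1 := by omega
          have hw1 : w = 1 := by omega
          subst hv1; subst hw1; decide
      rw [if_neg h2, hone]; norm_num
  · -- w ≤ 0 : count is the bit length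
    have hcond : (w ≤ v / 2 ∧ 0 < v / 2) ↔ 0 < v / 2 := by constructor <;> intro h <;> [exact h.2; exact ⟨by omega, h⟩]
    by_cases hv2 : 0 < v / 2
    · have hbl : PySem.Int.bitLength v = PySem.Int.bitLength (v / 2) + 1 := bl_half v hv
      simp only [shiftCount, if_neg hw0, if_pos (hcond.mpr hv2)]
      omega
    · have hv1 : v = 1 := by omega
      subst hv1
      rw [if_neg (by rw [hcond]; omega)]
      simp [shiftCount, if_neg hw0]
      decide

-- the key step lemma: one halving pass equals the closed-form shift
theorem step_eq (v w : Int) :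
    halveLoop v w =
      if w ≤ v ∧ 0 < v then (v >>> (shiftCount v w).toNat, shiftCount v w) else (v, 0) := by
  have main : ∀ N v w, v.toNat ≤ N → halveLoop v w =
      if w ≤ v ∧ 0 < v then (v >>> (shiftCount v w).toNat, shiftCount v w) else (v, 0) := by
    intro N
    induction N with
    | zero =>
      intro v w hN
      rw [halveLoop]
      rw [if_neg (by omega), if_neg (by omega)]
    | succ N ih =>
      intro v w hN
      by_cases h : w ≤ v ∧ 0 < v
      · obtain ⟨hw, hv⟩ := h
        rw [halveLoop, if_pos ⟨hw, hv⟩, if_pos ⟨hw, hv⟩]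
        have hfd : PySem.Int.floordiv v 2 = v / 2 := PySem.Int.floordiv_eq_ediv_of_pos (by norm_num)
        have hrec := ih (v / 2) w (by omega)
        have hsc := sc_rec v w hv hw
        rw [hfd, hrec]
        by_cases h2 : w ≤ v / 2 ∧ 0 < v / 2
        · rw [if_pos h2]
          rw [if_pos h2] at hsc
          have hnn : 0 ≤ shiftCount (v / 2) w := sc_nonneg _ _ h2.2 h2.1
          have ht : (shiftCount v w).toNat = (shiftCount (v / 2) w).toNat + 1 := by omega
          rw [ht, shr_succ]
          simp only [Prod.mk.injEq]
          exact ⟨trivial, by omega⟩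
        · rw [if_neg h2]
          rw [if_neg h2] at hsc
          have ht : (shiftCount v w).toNat = 1 := by omega
          rw [ht]
          have : v >>> (1 : Nat) = v / 2 := by rw [show (1:Nat) = 0 + 1 from rfl, shr_succ, shr_zero]
          rw [this]
          simp only [Prod.mk.injEq]
          exact ⟨trivial, by omega⟩
      · rw [halveLoop, if_neg h, if_neg h]
  exact main v.toNat v w le_rfl

theorem set_self (A : List Int) (i : Nat) (v : Int) (h : A[i]? = some v) : A.set i v = A := by
  have hi : i < A.length := (List.getElem?_eq_some_iff.mp h).1
  have hv : A[i] = v := by simpa [List.getElem?_eq_getElem hi] using h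
  simp [← hv]

-- the two loops agree everywhere
theorem loop_eq (i : Nat) (A : List Int) (res : Int) : loopA i A res = loopB i A res := by
  induction i generalizing A res with
  | zero =>
    rw [loopA, loopB]
    cases h0 : PySem.List.pyGet? A 0 with
    | none => rfl
    | some v =>
      cases h1 : PySem.List.pyGet? A 1 with
      | none => rfl
      | some w =>
        dsimp only
        rw [step_eq]
        by_cases h : w ≤ v ∧ 0 < v
        · simp only [if_pos h]
        · simp only [if_neg h]
          split <;> simp
  | succ j ih =>
    rw [loopA, loopB]
    cases h0 : PySem.List.pyGet? A ((j : Int) + 1) with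
    | none => rfl
    | some v =>
      cases h1 : PySem.List.pyGet? A ((j : Int) + 2) with
      | none => rfl
      | some w =>
        dsimp only
        rw [step_eq]
        by_cases h : w ≤ v ∧ 0 < v
        · simp only [if_pos h]
          split
          · rfl
          · exact ih _ _
        · simp only [if_neg h]
          have hA : A.set (j + 1) v = A := by
            apply set_self
            have : ((j : Int) + 1) = ((j + 1 : Nat) : Int) := by push_cast; ring
            rw [this, PySem.List.pyGet?_natCast] at h0
            exact h0
          split
          · rfl
          · rw [hA, add_zero]
            exact ih _ _

-- ===== VERDICT (by name: the statement is the Claim_ definition above) =====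
theorem solve_spec : Claim_equal_solve := by
  intro A n _ _
  unfold Spec_solve solve solve_alt
  split
  · exact loop_eq _ _ _
  · rfl
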